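-- pv_equiv track=rewrite | github.com/yhasansenyurt/InventoryManagementSoftware-DepoTakipYazilimi | envanter.py | entryUpper
-- ===== SOURCE A (Python) =====
-- def entryUpper(entry):
--
--     up = str()
--     for i in entry:
--         if i == 'i':
--             up = up + 'İ'
--         else:
--             up = up + i.upper()
--     return up
-- ===== SOURCE B (Python) =====
-- def entryUpper(entry):
--     return entry.replace('i', 'İ').upper()
-- ===== Notes on version B (the rewrite author's own statement) =====
-- stated objective: idiomatic
-- what changed: Replaces A's explicit char-by-char loop with quadratic string concatenation by two linear library passes: a global replace of the dotted lowercase i with its Turkish uppercase form, then str.upper(), relying on that uppercase form being fixed under str.upper.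
import Mathlib
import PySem

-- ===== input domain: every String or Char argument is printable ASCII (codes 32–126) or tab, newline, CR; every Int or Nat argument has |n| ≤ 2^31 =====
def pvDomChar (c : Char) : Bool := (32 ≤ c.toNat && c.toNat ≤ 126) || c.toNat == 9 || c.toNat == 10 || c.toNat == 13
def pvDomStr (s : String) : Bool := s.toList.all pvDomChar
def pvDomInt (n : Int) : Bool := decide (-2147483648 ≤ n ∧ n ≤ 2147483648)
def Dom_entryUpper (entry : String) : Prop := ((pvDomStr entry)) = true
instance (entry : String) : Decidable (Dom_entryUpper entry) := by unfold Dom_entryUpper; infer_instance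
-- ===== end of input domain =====

-- B replaces A's explicit char-by-char loop (quadratic string concatenation) by two linear library passes: replace 'i'→'İ', then upper.

-- ===== PORT A =====
-- literal port of A: fold over the characters, appending 'İ' for 'i' and i.upper() otherwise
def entryUpper (entry : String) : String :=
  entry.toList.foldl
    (fun up i => if i = 'i' then up ++ "İ" else up.push (PySem.Chars.upperChar i)) ""

-- ===== PORT B =====
def entryUpper_alt (entry : String) : String :=
  PySem.Str.upper (PySem.Str.replace entry "i" "İ")

-- ===== PRECONDITION & SPEC =====
def Spec_entryUpper (entry : String) (out : String) : Prop := out = entryUpper_alt entry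
instance (entry : String) (out : String) : Decidable (Spec_entryUpper entry out) := by unfold Spec_entryUpper; infer_instance

-- ===== CLAIM (what is proved, stated in full; the proofs are below) =====
def Claim_equal_entryUpper : Prop := ∀ (entry : String), Dom_entryUpper entry → Spec_entryUpper entry (entryUpper entry)

-- ===== LEMMAS AND PROOFS =====

-- the per-character effect both programs realise
def pvStep (c : Char) : List Char := if c = 'i' then ['İ'] else [c]

lemma replace_go_i (fuel : Nat) (l acc : List Char) (h : l.length ≤ fuel) :
    PySem.Chars.replace.go ['i'] ['İ'] fuel l acc
      = acc.reverse ++ l.flatMap pvStep := by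
  induction fuel generalizing l acc with
  | zero =>
    have : l = [] := List.eq_nil_of_length_eq_zero (Nat.le_zero.mp h)
    subst this; simp [PySem.Chars.replace.go]
  | succ n ih =>
    cases l with
    | nil => simp [PySem.Chars.replace.go]
    | cons c t =>
      by_cases hc : c = 'i'
      · subst hc
        rw [PySem.Chars.replace.go]
        simp only [List.isPrefixOf]
        simp [ih t _ (by simpa using Nat.le_of_succ_le_succ h), pvStep]
      · rw [PySem.Chars.replace.go]
        have : (['i'].isPrefixOf (c :: t)) = false := by
          simp [List.isPrefixOf]; exact fun h' => absurd h'.symm hc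
        simp [this, ih t _ (by simpa using Nat.le_of_succ_le_succ h), pvStep, hc]

lemma replace_i (l : List Char) :
    PySem.Chars.replace l ['i'] ['İ'] = l.flatMap pvStep := by
  rw [PySem.Chars.replace]
  simp only [List.isEmpty, reduceCtorEq, if_false]
  exact replace_go_i l.length l [] (le_refl _)

lemma foldlA (l : List Char) (up : String) :
    (l.foldl (fun up i => if i = 'i' then up ++ "İ" else up.push (PySem.Chars.upperChar i)) up).toList
      = up.toList ++ l.flatMap (fun c => if c = 'i' then ['İ'] else [PySem.Chars.upperChar c]) := by
  induction l generalizing up with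
  | nil => simp
  | cons c t ih =>
    by_cases hc : c = 'i'
    · subst hc; simp [ih]
    · simp [hc, ih]

lemma upper_step (c : Char) :
    (pvStep c).map PySem.Chars.upperChar = if c = 'i' then ['İ'] else [PySem.Chars.upperChar c] := by
  by_cases hc : c = 'i'
  · subst hc; simp [pvStep]; decide
  · simp [pvStep, hc]

-- ===== VERDICT (by name: the statement is the Claim_ definition above) =====
theorem entryUpper_spec : Claim_equal_entryUpper := by
  intro entry _
  unfold Spec_entryUpper entryUpper entryUpper_alt
  apply String.toList_injective
  rw [foldlA]
  rw [PySem.Str.toList_upper, PySem.Str.toList_replace]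
  show _ = PySem.Chars.upper (PySem.Chars.replace entry.toList "i".toList "İ".toList)
  have h1 : "i".toList = ['i'] := rfl
  have h2 : "İ".toList = ['İ'] := rfl
  rw [h1, h2, replace_i]
  simp only [PySem.Chars.upper, List.map_flatMap]
  simp [upper_step]
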